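-- pv_equiv track=rewrite | github.com/phj128/Kimi-Audio | kimia_infer/modeling/tokenization_kimia.py | _split_whitespaces_or_nonwhitespaces
-- ===== SOURCE A (Python) =====
-- from typing import (
--     AbstractSet,
--     cast,
--     Collection,
--     Dict,
--     Iterator,
--     List,
--     Literal,
--     Sequence,
--     Union,
--     Optional,
-- )
--
-- def _split_whitespaces_or_nonwhitespaces(
--     s: str, max_consecutive_slice_len: int
-- ) -> Iterator[str]:
--     """
--     Splits the string `s` so that each substring contains no more than `max_consecutive_slice_len`
--     consecutive whitespaces or consecutive non-whitespaces.
--     """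
--     current_slice_len = 0
--     current_slice_is_space = s[0].isspace() if len(s) > 0 else False
--     slice_start = 0
--
--     for i in range(len(s)):
--         is_now_space = s[i].isspace()
--
--         if current_slice_is_space ^ is_now_space:
--             current_slice_len = 1
--             current_slice_is_space = is_now_space
--         else:
--             current_slice_len += 1
--             if current_slice_len > max_consecutive_slice_len:
--                 yield s[slice_start:i]
--                 slice_start = i
--                 current_slice_len = 1
--     yield s[slice_start:]
-- ===== SOURCE B (Python) =====
-- from itertools import groupby
--
-- def _split_whitespaces_or_nonwhitespaces(s, max_consecutive_slice_len):
--     # Enumerate maximal same-type runs; within a run starting at pos, cut at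
--     # pos+max, pos+2*max, ... (strictly inside the run); slice between cuts.
--     cuts = [0]
--     pos = 0
--     for _, grp in groupby(s, key=str.isspace):
--         run_len = sum(1 for _ in grp)
--         c = pos + max_consecutive_slice_len
--         while c < pos + run_len:
--             cuts.append(c)
--             c += max_consecutive_slice_len
--         pos += run_len
--     cuts.append(len(s))
--     for a, b in zip(cuts, cuts[1:]):
--         yield s[a:b]
-- ===== Notes on version B (the rewrite author's own statement) =====
-- stated objective: faster
-- what changed: Replaces the per-character Python state machine (slice-length counter, type flag, rolling slice_start) by a run-based decomposition: itertools.groupby enumerates maximal same-type runs at C speed, cut positions inside each run are computed arithmetically (pos+max, pos+2*max, ...), and the output is sliced between consecutive boundaries; measured ~1.9x faster.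
-- outside the precondition, e.g. on _split_whitespaces_or_nonwhitespaces('ab', 0): A returns ['', 'a', 'b'], B does not finish within the time limit; on _split_whitespaces_or_nonwhitespaces('ab cd', -1): A returns ['', 'a', 'b c', 'd'], B does not finish within the time limit
import Mathlib
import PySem

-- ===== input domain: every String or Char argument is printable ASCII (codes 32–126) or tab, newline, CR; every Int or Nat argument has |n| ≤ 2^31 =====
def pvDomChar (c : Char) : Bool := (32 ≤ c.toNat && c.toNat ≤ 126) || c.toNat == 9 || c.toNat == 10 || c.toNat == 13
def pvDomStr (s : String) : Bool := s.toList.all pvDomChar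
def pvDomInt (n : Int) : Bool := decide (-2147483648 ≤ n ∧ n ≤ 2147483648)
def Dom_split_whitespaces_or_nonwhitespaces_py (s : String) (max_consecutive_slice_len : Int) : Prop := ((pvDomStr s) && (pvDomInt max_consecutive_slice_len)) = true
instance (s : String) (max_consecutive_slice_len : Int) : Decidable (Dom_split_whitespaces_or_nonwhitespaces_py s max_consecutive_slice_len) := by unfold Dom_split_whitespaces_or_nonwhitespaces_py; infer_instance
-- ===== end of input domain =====

-- B replaces A's per-character state machine by a run-based decomposition (maximal
-- same-type runs, arithmetic cut positions inside each run, slices between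
-- boundaries); same O(n) cost, alternative structure.


-- ===== PORT A =====
-- loop body of A's for-loop; state = (current_slice_len, current_slice_is_space, slice_start, yielded)
def pvStepA (s : String) (cs : List Char) (m : Int)
    (st : Int × Bool × Int × List String) (i : Int) : Int × Bool × Int × List String :=
  let b := PySem.Chars.isspace (PySem.List.pyGetD cs i ' ')
  if xor st.2.1 b then (1, b, st.2.2.1, st.2.2.2)
  else if st.1 + 1 > m then
    (1, st.2.1, i, st.2.2.2 ++ [PySem.Str.slice s (some st.2.2.1) (some i)])
  else (st.1 + 1, st.2.1, st.2.2.1, st.2.2.2)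

def split_whitespaces_or_nonwhitespaces_py (s : String) (max_consecutive_slice_len : Int) : List String :=
  let cs := s.toList
  let init : Int × Bool × Int × List String :=
    (0, (if 0 < cs.length then PySem.Chars.isspace (PySem.List.pyGetD cs 0 ' ') else false), 0, [])
  let fin := (PySem.List.pyRange 0 cs.length 1).foldl (pvStepA s cs max_consecutive_slice_len) init
  fin.2.2.2 ++ [PySem.Str.slice s (some fin.2.2.1) none]

-- ===== PORT B =====
-- groupby: lengths of the maximal same-type runs (current run type t, current count n)
def pvRunLens (t : Bool) (n : Int) : List Char → List Int
  | [] => [n]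
  | c :: rest =>
    if PySem.Chars.isspace c == t then pvRunLens t (n + 1) rest
    else n :: pvRunLens (PySem.Chars.isspace c) 1 rest

-- Source B's `while c < stop: cuts.append(c); c += m`; the fuel argument only bounds the
-- iteration count ((stop-c)/m ≤ stop-c iterations since m ≥ 1 on Pre_)
def pvCutsRun (c stop m : Int) : Nat → List Int
  | 0 => []
  | fuel + 1 => if c < stop then c :: pvCutsRun (c + m) stop m fuel else []

-- per-run body of Source B's for-loop; state = (pos, cuts)
def pvStepB (m : Int) (st : Int × List Int) (L : Int) : Int × List Int :=
  (st.1 + L, st.2 ++ pvCutsRun (st.1 + m) (st.1 + L) m (L - m).toNat)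

def split_whitespaces_or_nonwhitespaces_py_alt (s : String) (max_consecutive_slice_len : Int) : List String :=
  let cs := s.toList
  let lens : List Int :=
    match cs with
    | [] => []
    | c :: rest => pvRunLens (PySem.Chars.isspace c) 1 rest
  let cuts : List Int := (lens.foldl (pvStepB max_consecutive_slice_len) (0, [])).2 ++ [(cs.length : Int)]
  let bounds : List Int := 0 :: cuts
  (bounds.zip bounds.tail).map (fun p => PySem.Str.slice s (some p.1) (some p.2))

-- ===== PRECONDITION & SPEC =====
-- Pre_ excludes non-positive max_consecutive_slice_len on nonempty strings: there A's
-- counter overflows immediately and it returns a cascade of empty/one-char slices (an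
-- artefact of its counter), while B's natural cut loop (c += max) does not terminate.
def Pre_split_whitespaces_or_nonwhitespaces_py (s : String) (max_consecutive_slice_len : Int) : Prop :=
  1 ≤ max_consecutive_slice_len ∨ s = ""
instance (s : String) (max_consecutive_slice_len : Int) : Decidable (Pre_split_whitespaces_or_nonwhitespaces_py s max_consecutive_slice_len) := by unfold Pre_split_whitespaces_or_nonwhitespaces_py; infer_instance

def pvWitness_split_whitespaces_or_nonwhitespaces_py : String × Int := ("hi there", 3)

def Spec_split_whitespaces_or_nonwhitespaces_py (s : String) (max_consecutive_slice_len : Int) (out : List String) : Prop := out = split_whitespaces_or_nonwhitespaces_py_alt s max_consecutive_slice_len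
instance (s : String) (max_consecutive_slice_len : Int) (out : List String) : Decidable (Spec_split_whitespaces_or_nonwhitespaces_py s max_consecutive_slice_len out) := by unfold Spec_split_whitespaces_or_nonwhitespaces_py; infer_instance

-- ===== CLAIM (what is proved, stated in full; the proofs are below) =====
def Claim_equal_split_whitespaces_or_nonwhitespaces_py : Prop := ∀ (s : String) (max_consecutive_slice_len : Int), Dom_split_whitespaces_or_nonwhitespaces_py s max_consecutive_slice_len → Pre_split_whitespaces_or_nonwhitespaces_py s max_consecutive_slice_len → Spec_split_whitespaces_or_nonwhitespaces_py s max_consecutive_slice_len (split_whitespaces_or_nonwhitespaces_py s max_consecutive_slice_len)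

-- ===== LEMMAS AND PROOFS =====

-- abbreviations for the proofs
def pvP (cs : List Char) (i : Int) : Bool := PySem.Chars.isspace (PySem.List.pyGetD cs i ' ')
def pvSl (s : String) (a b : Int) : String := PySem.Str.slice s (some a) (some b)
def pvAdj (f : Int → Int → String) (a : Int) : List Int → List String
  | [] => []
  | b :: bs => f a b :: pvAdj f b bs
def pvLastD (a : Int) (l : List Int) : Int := l.foldl (fun _ x => x) a

theorem pvLastD_cons (a b : Int) (l : List Int) : pvLastD a (b :: l) = pvLastD b l := rfl

theorem pvLastD_cases (a : Int) (l : List Int) : pvLastD a l = a ∨ pvLastD a l ∈ l := by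
  induction l generalizing a with
  | nil => exact Or.inl rfl
  | cons b bs ih =>
    rw [pvLastD_cons]
    rcases ih b with h | h
    · exact Or.inr (by simp [h])
    · exact Or.inr (by simp [h])

theorem pvAdj_append (f : Int → Int → String) (a : Int) (xs ys : List Int) :
    pvAdj f a (xs ++ ys) = pvAdj f a xs ++ pvAdj f (pvLastD a xs) ys := by
  induction xs generalizing a with
  | nil => simp [pvAdj, pvLastD]
  | cons b bs ih => simp [pvAdj, pvLastD_cons, ih b]

theorem pvZip_adj (f : Int → Int → String) (a : Int) (l : List Int) :
    (((a :: l).zip l).map (fun p => f p.1 p.2)) = pvAdj f a l := by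
  induction l generalizing a with
  | nil => simp [pvAdj]
  | cons b bs ih => simp [pvAdj, ih b]

theorem pvCutsRun_nil (c stop m : Int) (h : stop ≤ c) : ∀ fuel, pvCutsRun c stop m fuel = [] := by
  intro fuel
  cases fuel with
  | zero => rfl
  | succ g => simp [pvCutsRun, show ¬ c < stop by omega]

theorem pvCutsRun_mem (stop m : Int) (hm : 1 ≤ m) :
    ∀ (fuel : Nat) (c x : Int), x ∈ pvCutsRun c stop m fuel → c ≤ x ∧ x < stop := by
  intro fuel
  induction fuel with
  | zero => intro c x hx; simp [pvCutsRun] at hx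
  | succ g ih =>
    intro c x hx
    by_cases hc : c < stop
    · simp only [pvCutsRun, if_pos hc, List.mem_cons] at hx
      rcases hx with rfl | hx
      · omega
      · have := ih (c + m) x hx; omega
    · simp [pvCutsRun, hc] at hx

theorem pvCutsRun_fuel (stop m : Int) (hm : 1 ≤ m) :
    ∀ (f₁ : Nat), ∀ (f₂ : Nat) (c : Int), stop - c ≤ (f₁ : Int) → stop - c ≤ (f₂ : Int) →
      pvCutsRun c stop m f₁ = pvCutsRun c stop m f₂ := by
  intro f₁
  induction f₁ with
  | zero =>
    intro f₂ c h1 h2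
    simp only [Nat.cast_zero] at h1
    rw [pvCutsRun_nil c stop m (by omega), pvCutsRun_nil c stop m (by omega)]
  | succ g ih =>
    intro f₂ c h1 h2
    by_cases hc : c < stop
    · cases f₂ with
      | zero => simp only [Nat.cast_zero] at h2; omega
      | succ g₂ =>
        simp only [pvCutsRun, if_pos hc]
        rw [ih g₂ (c + m) (by push_cast at h1 ⊢; omega) (by push_cast at h2 ⊢; omega)]
    · rw [pvCutsRun_nil c stop m (by omega), pvCutsRun_nil c stop m (by omega)]

-- inner invariant: A's loop across the remainder of one run emits exactly the
-- arithmetic cut positions r+m, r+2m, … of that run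
theorem pvInner (s : String) (cs : List Char) (m : Int) (hm : 1 ≤ m) :
    ∀ (k : Nat) (q r st e : Int) (t : Bool) (acc : List String),
      e = q + k → r ≤ q → q ≤ r + m →
      (∀ i : Int, q ≤ i → i < e → pvP cs i = t) →
      (PySem.List.pyRange q e).foldl (pvStepA s cs m) (q - r, t, st, acc) =
        (e - pvLastD r (pvCutsRun (r + m) e m (e - (r + m)).toNat), t,
         pvLastD st (pvCutsRun (r + m) e m (e - (r + m)).toNat),
         acc ++ pvAdj (pvSl s) st (pvCutsRun (r + m) e m (e - (r + m)).toNat)) := by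
  intro k
  induction k with
  | zero =>
    intro q r st e t acc he hrq hqm hP
    rw [PySem.List.pyRange_one_eq_nil (by omega),
      pvCutsRun_nil _ _ _ (by omega) _]
    simp only [List.foldl_nil, pvLastD, List.foldl_nil, pvAdj, List.append_nil, Prod.mk.injEq]
    exact ⟨by omega, trivial⟩
  | succ k ih =>
    intro q r st e t acc he hrq hqm hP
    have hqe : q < e := by omega
    rw [PySem.List.pyRange_one_cons hqe, List.foldl_cons]
    have hb : PySem.Chars.isspace (PySem.List.pyGetD cs q ' ') = t := hP q le_rfl hqe
    by_cases hc : q = r + m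
    · -- cut at q
      have hstep : pvStepA s cs m (q - r, t, st, acc) q
          = ((q + 1) - q, t, q, acc ++ [pvSl s st q]) := by
        simp only [pvStepA, hb, Bool.xor_self, Bool.false_eq_true, if_false,
          if_pos (by omega : q - r + 1 > m), Prod.mk.injEq]
        exact ⟨by omega, trivial, trivial, rfl⟩
      rw [hstep, ih (q + 1) q q e t (acc ++ [pvSl s st q]) (by omega) (by omega) (by omega)
        (fun i h1 h2 => hP i (by omega) h2)]
      have hfuel : (e - (r + m)).toNat = (e - q - 1).toNat + 1 := by omega
      have hC : pvCutsRun (r + m) e m (e - (r + m)).toNat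
          = q :: pvCutsRun (q + m) e m (e - (q + m)).toNat := by
        rw [hfuel, ← hc]
        simp only [pvCutsRun, if_pos hqe]
        rw [pvCutsRun_fuel e m hm (e - q - 1).toNat (e - (q + m)).toNat (q + m) (by omega) (by omega)]
      rw [hC, pvLastD_cons, pvLastD_cons]
      simp [pvAdj]
    · -- no cut: counter below the threshold
      have hstep : pvStepA s cs m (q - r, t, st, acc) q = ((q + 1) - r, t, st, acc) := by
        simp only [pvStepA, hb, Bool.xor_self, Bool.false_eq_true, if_false,
          if_neg (by omega : ¬ q - r + 1 > m), Prod.mk.injEq]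
        exact ⟨by omega, trivial⟩
      rw [hstep, ih (q + 1) r st e t acc (by omega) (by omega) (by omega)
        (fun i h1 h2 => hP i (by omega) h2)]

-- peel one maximal run off pvRunLens
theorem pvRunLens_peel (t : Bool) (cnt : Int) (rest : List Char) :
    pvRunLens t cnt rest =
      (cnt + ((rest.takeWhile (fun c => PySem.Chars.isspace c == t)).length : Int)) ::
        (match rest.dropWhile (fun c => PySem.Chars.isspace c == t) with
         | [] => []
         | c :: rest'' => pvRunLens (PySem.Chars.isspace c) 1 rest'') := by
  induction rest generalizing t cnt with
  | nil => simp [pvRunLens]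
  | cons x xs ih =>
    by_cases hx : PySem.Chars.isspace x == t
    · rw [show pvRunLens t cnt (x :: xs) = pvRunLens t (cnt + 1) xs by simp [pvRunLens, hx],
        ih t (cnt + 1)]
      simp only [List.takeWhile_cons, hx, if_true, List.dropWhile_cons, List.length_cons]
      congr 1
      push_cast
      ring
    · simp [pvRunLens, hx]

-- B's fold: the accumulated cut list factors out
theorem pvFoldB_acc (m : Int) :
    ∀ (lens : List Int) (p : Int) (acc : List Int),
      (lens.foldl (pvStepB m) (p, acc)).1 = (lens.foldl (pvStepB m) (p, [])).1 ∧
      (lens.foldl (pvStepB m) (p, acc)).2 = acc ++ (lens.foldl (pvStepB m) (p, [])).2 := by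
  intro lens
  induction lens with
  | nil => intro p acc; simp
  | cons L ls ih =>
    intro p acc
    simp only [List.foldl_cons, pvStepB]
    constructor
    · rw [(ih (p + L) (acc ++ pvCutsRun (p + m) (p + L) m (L - m).toNat)).1,
        (ih (p + L) ([] ++ pvCutsRun (p + m) (p + L) m (L - m).toNat)).1]
    · rw [(ih (p + L) (acc ++ pvCutsRun (p + m) (p + L) m (L - m).toNat)).2,
        (ih (p + L) ([] ++ pvCutsRun (p + m) (p + L) m (L - m).toNat)).2]
      simp

-- final slice s[a:] = s[a:len(s)]
theorem pvSl_last (s : String) (a : Int) (h0 : 0 ≤ a) :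
    pvSl s a (s.toList.length : Int) = PySem.Str.slice s (some a) none := by
  rw [← String.toList_inj]
  simp only [pvSl, PySem.Str.toList_slice, PySem.Chars.slice_eq_listSlice]
  rw [PySem.List.slice_toNat _ h0 (by positivity), PySem.List.slice_from _ h0]
  apply List.take_of_length_le
  simp

theorem pvDropWhile_head_false {p : Char → Bool} {l l' : List Char} {c : Char}
    (h : l.dropWhile p = c :: l') : p c = false := by
  have h0 : l.dropWhile p ≠ [] := by rw [h]; simp
  have hne := List.head_dropWhile_not p h0
  have h1 : (l.dropWhile p).head h0 = c := by
    have h2 : (l.dropWhile p).head? = some c := by rw [h]; rfl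
    rwa [List.head?_eq_some_head h0, Option.some_inj] at h2
  rwa [h1] at hne

-- main run-by-run induction
theorem pvMain (s : String) (m : Int) (hm : 1 ≤ m) :
    ∀ (fuelN : Nat) (rest : List Char) (q st : Int) (t : Bool) (acc : List String),
      rest.length ≤ fuelN →
      0 ≤ q → q < (s.toList.length : Int) → 0 ≤ st → st ≤ (s.toList.length : Int) →
      s.toList.drop (q.toNat + 1) = rest →
      pvP s.toList q = t →
      (let fin := (PySem.List.pyRange (q + 1) (s.toList.length : Int)).foldl (pvStepA s s.toList m) (1, t, st, acc);
       fin.2.2.2 ++ [PySem.Str.slice s (some fin.2.2.1) none]) =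
      acc ++ pvAdj (pvSl s) st
        (((pvRunLens t 1 rest).foldl (pvStepB m) (q, [])).2 ++ [(s.toList.length : Int)]) := by
  intro fuelN
  induction fuelN with
  | zero =>
    intro rest q st t acc hfuel h0 hn hst0 hstn hdrop ht
    -- rest = [], a run of exactly the single character at q ends the string
    have hrest : rest = [] := List.eq_nil_of_length_eq_zero (by omega)
    subst hrest
    have hlen0 := congrArg List.length hdrop
    rw [List.length_drop] at hlen0
    simp only [List.length_nil] at hlen0
    rw [show (PySem.List.pyRange (q + 1) (s.toList.length : Int)) = [] from
      PySem.List.pyRange_one_eq_nil (by omega)]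
    simp only [List.foldl_nil, pvRunLens, List.foldl_cons, List.foldl_nil, pvStepB]
    rw [show pvCutsRun (q + m) (q + 1) m ((1 : Int) - m).toNat = [] from
      pvCutsRun_nil (q + m) (q + 1) m (by omega) _]
    rw [← pvSl_last s st hst0]
    simp [pvAdj]
  | succ fuelN ih =>
    intro rest q st t acc hfuel h0 hn hst0 hstn hdrop ht
    have hlen := congrArg List.length hdrop
    rw [List.length_drop] at hlen
    obtain ⟨pre, hpre⟩ : ∃ pre, pre = rest.takeWhile (fun c => PySem.Chars.isspace c == t) :=
      ⟨_, rfl⟩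
    obtain ⟨rest', hrest'⟩ : ∃ rest', rest' = rest.dropWhile (fun c => PySem.Chars.isspace c == t) :=
      ⟨_, rfl⟩
    have hsplit : pre ++ rest' = rest := by
      rw [hpre, hrest']; exact List.takeWhile_append_dropWhile
    have hklen : pre.length + rest'.length = rest.length := by
      rw [← hsplit]; simp
    obtain ⟨k, hk⟩ : ∃ k, k = pre.length := ⟨_, rfl⟩
    obtain ⟨e, hee⟩ : ∃ e : Int, e = q + 1 + k := ⟨_, rfl⟩
    have hen : e ≤ (s.toList.length : Int) := by omega
    -- characters q+1 .. e-1 are all of type t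
    have hPmid : ∀ i : Int, q + 1 ≤ i → i < e → pvP s.toList i = t := by
      intro i h1 h2
      have hjlt : i.toNat - (q.toNat + 1) < k := by omega
      have hilen : i.toNat < s.toList.length := by omega
      have h2' : s.toList[i.toNat]? = rest[i.toNat - (q.toNat + 1)]? := by
        conv_rhs => rw [← hdrop]
        rw [List.getElem?_drop]
        congr 1
        omega
      have h1' : rest[i.toNat - (q.toNat + 1)]? = some (pre[i.toNat - (q.toNat + 1)]'(by omega)) := by
        conv_lhs => rw [← hsplit]
        rw [List.getElem?_append_left (by omega), List.getElem?_eq_getElem (by omega)]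
      have hval : s.toList[i.toNat]'hilen = pre[i.toNat - (q.toNat + 1)]'(by omega) := by
        have hsome := h2'.trans h1'
        rwa [List.getElem?_eq_getElem hilen, Option.some_inj] at hsome
      have hmem : pre[i.toNat - (q.toNat + 1)]'(by omega) ∈ rest.takeWhile (fun c => PySem.Chars.isspace c == t) := by
        rw [← hpre]
        exact List.getElem_mem _
      have hmt := List.mem_takeWhile_imp hmem
      rw [pvP, PySem.List.pyGetD_eq_getElem s.toList (i := i) ' ' (by omega) (by omega),
        hval]
      simpa using hmt
    -- run the inner lemma over [q+1, e)
    have hinner := pvInner s s.toList m hm k (q + 1) q st e t acc (by omega) (by omega)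
      (by omega) hPmid
    have hq1r : q + 1 - q = (1 : Int) := by omega
    rw [hq1r] at hinner
    set C := pvCutsRun (q + m) e m (e - (q + m)).toNat with hC
    -- bounds for the new slice start
    have hst'0 : 0 ≤ pvLastD st C := by
      rcases pvLastD_cases st C with h | h
      · omega
      · have := pvCutsRun_mem e m hm _ _ _ h; omega
    have hst'n : pvLastD st C ≤ (s.toList.length : Int) := by
      rcases pvLastD_cases st C with h | h
      · omega
      · have := pvCutsRun_mem e m hm _ _ _ h; omega
    have hfe : ((1 : Int) + (k : Int) - m).toNat = (e - (q + m)).toNat := by omega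
    have hqe : q + ((1 : Int) + (k : Int)) = e := by omega
    cases hr : rest' with
    | nil =>
      -- last run: e = len(s)
      have hke : e = (s.toList.length : Int) := by
        rw [hr] at hklen; simp at hklen; omega
      have hpeel : pvRunLens t 1 rest = [1 + (k : Int)] := by
        rw [pvRunLens_peel t 1 rest, ← hpre, ← hrest', hr]
        simp [hk]
      rw [hpeel]
      simp only [List.foldl_cons, List.foldl_nil, pvStepB, List.nil_append]
      rw [show (PySem.List.pyRange (q + 1) (s.toList.length : Int)) =
        PySem.List.pyRange (q + 1) e from by rw [hke], hinner]
      rw [hqe, hfe, ← hC, pvAdj_append, ← hke, ← pvSl_last s (pvLastD st C) hst'0]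
      simp [pvAdj, hke]
    | cons c rest'' =>
      have hpeel : pvRunLens t 1 rest = (1 + (k : Int)) :: pvRunLens (PySem.Chars.isspace c) 1 rest'' := by
        rw [pvRunLens_peel t 1 rest, ← hpre, ← hrest', hr]
        simp [hk]
      rw [hpeel]
      have hkl : k + 1 + rest''.length = rest.length := by
        rw [hr] at hklen; simp at hklen; omega
      have hel : e < (s.toList.length : Int) := by omega
      -- the character at e starts a run of the opposite type
      have hec : e.toNat < s.toList.length := by omega
      have hjr : e.toNat - (q.toNat + 1) < rest.length := by omega
      have hPc : pvP s.toList e = PySem.Chars.isspace c := by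
        have h2' : s.toList[e.toNat]? = rest[e.toNat - (q.toNat + 1)]? := by
          conv_rhs => rw [← hdrop]
          rw [List.getElem?_drop]
          congr 1
          omega
        have h1' : rest[e.toNat - (q.toNat + 1)]? = some c := by
          conv_lhs => rw [← hsplit, hr]
          rw [List.getElem?_append_right (by omega)]
          rw [show e.toNat - (q.toNat + 1) - pre.length = 0 from by omega]
          rfl
        have hgc : s.toList[e.toNat]'hec = c := by
          have hsome := h2'.trans h1'
          rwa [List.getElem?_eq_getElem hec, Option.some_inj] at hsome
        rw [pvP, PySem.List.pyGetD_eq_getElem s.toList (i := e) ' ' (by omega) (by omega),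
          hgc]
      have hcne : PySem.Chars.isspace c ≠ t := by
        have hh := pvDropWhile_head_false (hrest'.symm.trans hr)
        simpa using hh
      -- A: split the range at e, run the inner lemma, take the type-change step at e
      rw [show (PySem.List.pyRange (q + 1) (s.toList.length : Int)) =
        PySem.List.pyRange (q + 1) e ++ PySem.List.pyRange e (s.toList.length : Int) from
        PySem.List.pyRange_one_append _ _ _ (by omega) (by omega)]
      rw [List.foldl_append, hinner]
      rw [show (PySem.List.pyRange e (s.toList.length : Int)) =
        e :: PySem.List.pyRange (e + 1) (s.toList.length : Int) from
        PySem.List.pyRange_one_cons (by omega), List.foldl_cons]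
      have hstep : pvStepA s s.toList m
          (e - pvLastD q C, t, pvLastD st C, acc ++ pvAdj (pvSl s) st C) e
          = (1, PySem.Chars.isspace c, pvLastD st C, acc ++ pvAdj (pvSl s) st C) := by
        simp only [pvStepA,
          show PySem.Chars.isspace (PySem.List.pyGetD s.toList e ' ') = PySem.Chars.isspace c from hPc]
        rw [if_pos (by cases hisc : PySem.Chars.isspace c <;> cases ht2 : t <;> simp_all)]
      rw [hstep]
      -- recurse over the rest of the string
      have hdrop'' : s.toList.drop (e.toNat + 1) = rest'' := by
        have he1 : e.toNat + 1 = (q.toNat + 1) + (k + 1) := by omega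
        rw [he1, ← List.drop_drop, hdrop, ← hsplit, hr, List.drop_append]
        rw [List.drop_eq_nil_of_le (by omega), show k + 1 - pre.length = 1 from by omega]
        rfl
      have hrec := ih rest'' e (pvLastD st C) (PySem.Chars.isspace c)
        (acc ++ pvAdj (pvSl s) st C) (by omega) (by omega) hel hst'0 hst'n hdrop'' hPc
      simp only at hrec
      rw [hrec]
      -- B: the fold over the peeled run list
      simp only [List.foldl_cons, pvStepB, List.nil_append]
      rw [hqe, hfe, ← hC]
      rw [(pvFoldB_acc m (pvRunLens (PySem.Chars.isspace c) 1 rest'') e C).2]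
      simp [pvAdj_append, List.append_assoc]

-- ===== VERDICT (by name: the statement is the Claim_ definition above) =====
theorem split_whitespaces_or_nonwhitespaces_py_spec : Claim_equal_split_whitespaces_or_nonwhitespaces_py := by
  intro s m _hdom hpre
  show split_whitespaces_or_nonwhitespaces_py s m = split_whitespaces_or_nonwhitespaces_py_alt s m
  unfold split_whitespaces_or_nonwhitespaces_py split_whitespaces_or_nonwhitespaces_py_alt
  cases hcs : s.toList with
  | nil =>
    have h0 : (s.toList.length : Int) = 0 := by rw [hcs]; rfl
    have hsl := pvSl_last s 0 le_rfl
    rw [h0] at hsl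
    simp only [List.length_nil, Nat.cast_zero, PySem.List.pyRange_one_eq_nil le_rfl,
      List.foldl_nil, List.nil_append, List.zip_cons_cons, List.tail_cons, List.zip_nil_right,
      List.map_cons, List.map_nil]
    rw [← hsl]
    rfl
  | cons c rest =>
    have hm : 1 ≤ m := by
      rcases hpre with h | h
      · exact h
      · exfalso; rw [h] at hcs; simp at hcs
    have hn1' : (0 : Int) < ((c :: rest).length : Int) := by simp
    have hvc : pvP (c :: rest) 0 = PySem.Chars.isspace c := by
      rw [pvP, PySem.List.pyGetD_eq_getElem (c :: rest) (i := 0) ' ' le_rfl hn1']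
      rfl
    have hinit : (if 0 < (c :: rest).length then PySem.Chars.isspace (PySem.List.pyGetD (c :: rest) 0 ' ') else false)
        = pvP (c :: rest) 0 := by rw [if_pos (by simp)]; rfl
    have hrange : PySem.List.pyRange 0 ((c :: rest).length : Int)
        = 0 :: PySem.List.pyRange 1 ((c :: rest).length : Int) := PySem.List.pyRange_one_cons hn1'
    have hstep : pvStepA s (c :: rest) m (0, PySem.Chars.isspace c, 0, []) 0
        = (1, PySem.Chars.isspace c, 0, []) := by
      simp only [pvStepA,
        show PySem.Chars.isspace (PySem.List.pyGetD (c :: rest) 0 ' ') = PySem.Chars.isspace c from hvc,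
        Bool.xor_self, Bool.false_eq_true, if_false, if_neg (by omega : ¬ (0 : Int) + 1 > m)]
      norm_num
    have hdrop1 : s.toList.drop ((0 : Int).toNat + 1) = rest := by rw [hcs]; rfl
    have hmain := pvMain s m hm rest.length rest 0 0 (pvP s.toList 0) [] le_rfl le_rfl
      (by rw [hcs]; exact hn1') le_rfl (by rw [hcs]; omega) hdrop1 rfl
    simp only at hmain
    rw [hcs, hvc] at hmain
    rw [show (0 : Int) + 1 = 1 from rfl] at hmain
    simp only [hinit, hrange, List.foldl_cons, hvc, hstep]
    rw [hmain]
    simp only [List.nil_append]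
    rw [← pvZip_adj (pvSl s) 0
      (((pvRunLens (PySem.Chars.isspace c) 1 rest).foldl (pvStepB m) (0, [])).2 ++ [((c :: rest).length : Int)])]
    rfl
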